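-- pv_equiv track=rewrite | github.com/mrbartrns/algorithm-and-structure | programmers/lv2_review/clustring.py | get_sum_set
-- ===== SOURCE A (Python) =====
-- def get_sum_set(set1, set2):
--     cnt = 0
--     ret = {}
--     for key in set1:
--         ret[key] = max(set1.get(key, 0), set2.get(key, 0))
--     for key in set2:
--         ret[key] = max(set1.get(key, 0), set2.get(key, 0))
--     for key in ret:
--         cnt += ret[key]
--     return cnt
-- ===== SOURCE B (Python) =====
-- def get_sum_set(set1, set2):
--     pairs = sorted(list(set1.items()) + list(set2.items()), key=lambda p: p[0])
--     total = 0
--     i = 0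
--     n = len(pairs)
--     while i < n:
--         if i + 1 < n and pairs[i + 1][0] == pairs[i][0]:
--             total += max(pairs[i][1], pairs[i + 1][1])
--             i += 2
--         else:
--             total += max(pairs[i][1], 0)
--             i += 1
--     return total
-- ===== Notes on version B (the rewrite author's own statement) =====
-- stated objective: alternative
-- what changed: Replaces A's hash-style max-dict (three loops: two insertion passes and a summing pass) by a sort-based algorithm: concatenate both item lists, sort by key, then a single scan that consumes adjacent equal-key groups (pairs) and accumulates the max of each group.
import Mathlib
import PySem

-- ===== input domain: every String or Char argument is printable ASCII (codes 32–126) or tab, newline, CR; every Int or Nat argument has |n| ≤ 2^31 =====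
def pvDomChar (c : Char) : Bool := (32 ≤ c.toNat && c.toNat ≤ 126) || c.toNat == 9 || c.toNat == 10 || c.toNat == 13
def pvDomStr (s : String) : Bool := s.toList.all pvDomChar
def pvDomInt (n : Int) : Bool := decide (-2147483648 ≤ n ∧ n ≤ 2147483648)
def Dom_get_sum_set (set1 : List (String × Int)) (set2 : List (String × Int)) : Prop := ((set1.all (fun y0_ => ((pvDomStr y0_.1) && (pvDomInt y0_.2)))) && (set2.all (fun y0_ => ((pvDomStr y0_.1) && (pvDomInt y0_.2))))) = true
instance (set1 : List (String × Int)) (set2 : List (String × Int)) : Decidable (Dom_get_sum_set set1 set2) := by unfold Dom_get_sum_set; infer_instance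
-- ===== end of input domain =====

-- B replaces A's max-dict built by three loops with a sort-based algorithm: sort the
-- concatenated item lists by key and scan once, consuming adjacent equal-key groups
-- (objective: alternative algorithm, no dict is built).

-- ===== PORT A =====
-- A: builds dict ret with ret[k] = max(set1.get(k,0), set2.get(k,0)) for every key of set1,
-- then every key of set2, then sums ret's values by iterating ret's keys.
def get_sum_set (set1 : List (String × Int)) (set2 : List (String × Int)) : Int :=
  let d1 := PySem.Dict.mk set1
  let d2 := PySem.Dict.mk set2
  let ret : PySem.Dict String Int :=
    set1.foldl (fun r p => r.insert p.1 (max (d1.getD p.1 0) (d2.getD p.1 0))) PySem.Dict.empty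
  let ret :=
    set2.foldl (fun r p => r.insert p.1 (max (d1.getD p.1 0) (d2.getD p.1 0))) ret
  ret.keys.foldl (fun cnt k => cnt + ret.getD k 0) 0

-- ===== PORT B =====
-- the while loop of Source B: consume the sorted pair list front-to-back, two entries at a
-- time when the next key equals the current one, one entry otherwise.
def pvScanB : List (String × Int) → Int
  | [] => 0
  | [(_, v1)] => max v1 0
  | (k1, v1) :: (k2, v2) :: rest =>
    if k2 == k1 then max v1 v2 + pvScanB rest
    else max v1 0 + pvScanB ((k2, v2) :: rest)

-- B: pairs = sorted(items1 + items2, key=fst); one scan over adjacent equal-key groups.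
def get_sum_set_alt (set1 : List (String × Int)) (set2 : List (String × Int)) : Int :=
  pvScanB (PySem.List.sorted ((PySem.Dict.mk set1).items ++ (PySem.Dict.mk set2).items)
    (fun p => p.1) false)

-- ===== PRECONDITION & SPEC =====
-- Pre_ excludes association lists with duplicate keys: such a list does not arise from a
-- Python dict (both programs only ever receive dicts, whose keys are unique), and its
-- list→dict reading (first vs last occurrence wins) is ambiguous.
def Pre_get_sum_set (set1 : List (String × Int)) (set2 : List (String × Int)) : Prop :=
  (set1.map Prod.fst).Nodup ∧ (set2.map Prod.fst).Nodup
instance (set1 : List (String × Int)) (set2 : List (String × Int)) : Decidable (Pre_get_sum_set set1 set2) := by unfold Pre_get_sum_set; infer_instance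
def pvWitness_get_sum_set : (List (String × Int)) × (List (String × Int)) :=
  ([("a", 1), ("c", -2)], [("a", 2), ("b", -3)])
def Spec_get_sum_set (set1 : List (String × Int)) (set2 : List (String × Int)) (out : Int) : Prop := out = get_sum_set_alt set1 set2
instance (set1 : List (String × Int)) (set2 : List (String × Int)) (out : Int) : Decidable (Spec_get_sum_set set1 set2 out) := by unfold Spec_get_sum_set; infer_instance

-- ===== CLAIM (what is proved, stated in full; the proofs are below) =====
def Claim_equal_get_sum_set : Prop := ∀ (set1 : List (String × Int)) (set2 : List (String × Int)), Dom_get_sum_set set1 set2 → Pre_get_sum_set set1 set2 → Spec_get_sum_set set1 set2 (get_sum_set set1 set2)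

-- ===== LEMMAS AND PROOFS =====

-- the per-key contribution read off a key's (1- or 2-element) value group
def pvContrib (vs : List Int) : Int :=
  match vs with
  | [v] => max v 0
  | [v1, v2] => max v1 v2
  | _ => 0

/-- A fold inserting, for each key of `l`, a value that depends only on the key, starting from a
dict whose items already have that shape, yields the dict whose key list is the set-update of the
start keys by `l` and whose values are given by `f`. -/
theorem items_foldl_insert_fun (f : String → Int) (l ks : List String) (hnd : ks.Nodup) :
    (l.foldl (fun (r : PySem.Dict String Int) k => r.insert k (f k))
        (PySem.Dict.mk (ks.map (fun k => (k, f k))))).items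
      = (PySem.Set.update ks l).map (fun k => (k, f k)) := by
  induction l generalizing ks with
  | nil => simp [PySem.Set.update]
  | cons x l ih =>
    simp only [List.foldl_cons, PySem.Set.update_cons]
    by_cases hx : x ∈ ks
    · have hc : (PySem.Dict.mk (ks.map (fun k => (k, f k)))).contains x = true := by
        simp [Function.comp_def, hx]
      have : (PySem.Dict.mk (ks.map (fun k => (k, f k)))).insert x (f x)
          = PySem.Dict.mk (ks.map (fun k => (k, f k))) := by
        apply PySem.Dict.ext
        rw [PySem.Dict.items_insert, if_pos hc]
        rw [List.map_map]
        apply List.map_congr_left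
        intro a _
        by_cases hax : a = x <;> simp [hax]
      rw [this, PySem.Set.add_of_mem hx]
      exact ih ks hnd
    · have hc : (PySem.Dict.mk (ks.map (fun k => (k, f k)))).contains x = false := by
        simp [Function.comp_def]
        exact fun a ha h => hx (h ▸ ha)
      have : (PySem.Dict.mk (ks.map (fun k => (k, f k)))).insert x (f x)
          = PySem.Dict.mk ((ks ++ [x]).map (fun k => (k, f k))) := by
        apply PySem.Dict.ext
        rw [PySem.Dict.items_insert, if_neg (by simp [hc])]
        simp
      rw [this, PySem.Set.add_of_not_mem hx]
      refine ih (ks ++ [x]) ?_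
      simp [List.nodup_append, hnd]
      exact fun a ha h => hx (h ▸ ha)

/-- A's program equals the sum of the pointwise max over the first-occurrence union of the keys. -/
theorem pvA_eq (set1 set2 : List (String × Int)) :
    get_sum_set set1 set2
      = ((PySem.Set.ofList (set1.map Prod.fst ++ set2.map Prod.fst)).map
          (fun k => max ((PySem.Dict.mk set1).getD k 0) ((PySem.Dict.mk set2).getD k 0))).sum := by
  simp only [get_sum_set]
  set f : String → Int :=
    fun k => max ((PySem.Dict.mk set1).getD k 0) ((PySem.Dict.mk set2).getD k 0) with hf
  rw [← List.foldl_map (f := Prod.fst)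
        (g := fun (r : PySem.Dict String Int) k => r.insert k (f k)),
      ← List.foldl_map (f := Prod.fst)
        (g := fun (r : PySem.Dict String Int) k => r.insert k (f k)),
      ← List.foldl_append]
  set L := set1.map Prod.fst ++ set2.map Prod.fst with hL
  set U : List String := PySem.Set.ofList L with hU
  have hUnd : U.Nodup := PySem.Set.nodup_ofList L
  set ret := L.foldl (fun (r : PySem.Dict String Int) k => r.insert k (f k)) PySem.Dict.empty
    with hret
  have hitems : ret.items = U.map (fun k => (k, f k)) := by
    rw [hret]
    have := items_foldl_insert_fun f L [] List.nodup_nil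
    simpa [PySem.Set.update_nil_left, ← hU] using this
  have hkeys : ret.keys = U := by
    simp [PySem.Dict.keys, hitems, List.map_map, Function.comp_def]
  have hknd : ret.keys.Nodup := hkeys ▸ hUnd
  have hgetD : ∀ k ∈ ret.keys, ret.getD k 0 = f k := by
    intro k hk
    apply PySem.Dict.getD_of_mem_items _ _ hknd
    rw [hitems]
    rw [hkeys] at hk
    exact List.mem_map_of_mem hk
  have hcong : List.foldl (fun cnt k => cnt + ret.getD k 0) 0 ret.keys
      = List.foldl (fun cnt k => cnt + f k) 0 ret.keys := by
    apply PySem.List.foldl_congr_mem'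
    intro x hx acc
    rw [hgetD x hx]
  rw [hcong, PySem.List.foldl_add (g := f), hkeys]
  simp

/-- On a pair list whose key column is duplicate-free, filtering by a present key yields
exactly that pair. -/
theorem pvFilter_key_of_nodup {l : List (String × Int)} {k : String} {v : Int}
    (hn : (l.map Prod.fst).Nodup) (hm : (k, v) ∈ l) :
    l.filter (fun p => p.1 == k) = [(k, v)] := by
  induction l with
  | nil => cases hm
  | cons x t ih =>
    simp only [List.map_cons, List.nodup_cons] at hn
    rcases List.mem_cons.1 hm with rfl | hmt
    · have ht : t.filter (fun p => p.1 == k) = [] := by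
        rw [List.filter_eq_nil_iff]
        intro p hp hpk
        exact hn.1 (by simpa [← (beq_iff_eq.1 hpk)] using List.mem_map_of_mem (f := Prod.fst) hp)
      simp [ht]
    · have hxk : x.1 ≠ k := by
        intro h
        exact hn.1 (h ▸ List.mem_map_of_mem (f := Prod.fst) hmt)
      simp only [List.filter_cons, beq_iff_eq, hxk, if_false]
      simpa [hxk] using ih hn.2 hmt

/-- A list permuting a two-element list is one of its two arrangements. -/
theorem pvPerm_pair {α : Type} [DecidableEq α] {l : List α} {a b : α} (h : l.Perm [a, b]) :
    l = [a, b] ∨ l = [b, a] := by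
  match l, h.length_eq with
  | [x, y], _ =>
    have hx : x ∈ [a, b] := h.mem_iff.mp List.mem_cons_self
    have hy : y ∈ [a, b] := h.mem_iff.mp (List.mem_cons_of_mem _ List.mem_cons_self)
    have hca := h.count_eq a
    have hcb := h.count_eq b
    simp only [List.mem_cons, List.not_mem_nil, or_false] at hx hy
    rcases hx with hxa | hxb
    · rcases hy with hya | hyb
      · by_cases hab : a = b
        · exact Or.inl (by rw [hxa, hya, ← hab])
        · exfalso
          rw [hxa, hya] at hcb
          simp [hab, Ne.symm hab] at hcb
      · exact Or.inl (by rw [hxa, hyb])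
    · rcases hy with hya | hyb
      · exact Or.inr (by rw [hxb, hya])
      · by_cases hab : a = b
        · exact Or.inl (by rw [hxb, hyb, hab])
        · exfalso
          rw [hxb, hyb] at hca
          simp [hab, Ne.symm hab] at hca

/-- Dropping the head of a pair list cannot increase a key's multiplicity. -/
theorem pvCount_cons_le (x : String × Int) (l : List (String × Int)) (k : String) :
    ((l.map Prod.fst).count k) ≤ (((x :: l).map Prod.fst).count k) := by
  simp only [List.map_cons, List.count_cons]
  split <;> omega

/-- A key occurring in the key column has a value paired with it. -/
theorem pvMemVal {l : List (String × Int)} {k : String} (h : k ∈ l.map Prod.fst) :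
    ∃ v, (k, v) ∈ l := by
  obtain ⟨p, hp, hpk⟩ := List.mem_map.1 h
  exact ⟨p.2, by rw [← hpk]; simpa using hp⟩

/-- The scan of a key-sorted pair list in which no key occurs more than twice is the sum,
over the distinct keys, of the contribution of that key's value group. -/
theorem pvScanB_eq (P : List (String × Int)) :
    P.Pairwise (fun a b => a.1 ≤ b.1) → (∀ k, (P.map Prod.fst).count k ≤ 2) →
    pvScanB P = ((P.map Prod.fst).dedup.map
      (fun k => pvContrib ((P.filter (fun p => p.1 == k)).map Prod.snd))).sum := by
  induction P using pvScanB.induct with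
  | case1 => intro _ _; simp [pvScanB]
  | case2 k v => intro _ _; simp [pvScanB, pvContrib]
  | case3 k1 v1 k2 v2 rest heq ih =>
    intro hs hc
    have hk : k2 = k1 := by simpa using heq
    subst hk
    have hcnt1 : (rest.map Prod.fst).count k2 = 0 := by
      have h := hc k2
      simp at h
      omega
    have hnot : k2 ∉ rest.map Prod.fst := List.count_eq_zero.1 hcnt1
    have hs' : rest.Pairwise (fun a b : String × Int => a.1 ≤ b.1) :=
      (List.pairwise_cons.1 (List.pairwise_cons.1 hs).2).2
    have hc' : ∀ k, (rest.map Prod.fst).count k ≤ 2 := fun k =>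
      le_trans (le_trans (pvCount_cons_le _ _ _) (pvCount_cons_le _ _ _)) (hc k)
    have hfr : rest.filter (fun p => p.1 == k2) = [] := by
      rw [List.filter_eq_nil_iff]
      intro p hp hpk
      exact hnot (by simpa [← (beq_iff_eq.1 hpk)] using List.mem_map_of_mem (f := Prod.fst) hp)
    have hd : (((k2,v1) :: (k2,v2) :: rest).map Prod.fst).dedup
        = k2 :: (rest.map Prod.fst).dedup := by
      simp only [List.map_cons]
      rw [List.dedup_cons_of_mem (by simp), List.dedup_cons_of_notMem hnot]
    have hhead : pvContrib ((((k2,v1) :: (k2,v2) :: rest).filter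
        (fun p => p.1 == k2)).map Prod.snd) = max v1 v2 := by
      simp [hfr, pvContrib]
    have htail : ∀ k ∈ (rest.map Prod.fst).dedup,
        pvContrib ((((k2,v1) :: (k2,v2) :: rest).filter (fun p => p.1 == k)).map Prod.snd)
          = pvContrib ((rest.filter (fun p => p.1 == k)).map Prod.snd) := by
      intro k hk
      have hkne : k2 ≠ k := fun h => hnot (h ▸ List.mem_dedup.1 hk)
      simp [hkne]
    rw [hd, List.map_cons, List.sum_cons, hhead, List.map_congr_left htail]
    have hL : pvScanB ((k2,v1) :: (k2,v2) :: rest) = max v1 v2 + pvScanB rest := by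
      simp [pvScanB]
    rw [hL, ih hs' hc']
  | case4 k1 v1 k2 v2 rest hne ih =>
    intro hs hc
    have hkne : k2 ≠ k1 := by simpa using hne
    have hle12 : k1 ≤ k2 := (List.pairwise_cons.1 hs).1 (k2, v2) List.mem_cons_self
    have hnot : k1 ∉ ((k2,v2) :: rest).map Prod.fst := by
      intro hm
      simp only [List.map_cons, List.mem_cons] at hm
      rcases hm with h | h
      · exact hkne h.symm
      · obtain ⟨p, hp, hpk⟩ := List.mem_map.1 h
        have hk2p : k2 ≤ p.1 := (List.pairwise_cons.1 (List.pairwise_cons.1 hs).2).1 _ hp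
        exact hkne (le_antisymm (hpk ▸ hk2p) hle12)
    have hs' : ((k2,v2) :: rest).Pairwise (fun a b : String × Int => a.1 ≤ b.1) :=
      (List.pairwise_cons.1 hs).2
    have hc' : ∀ k, (((k2,v2) :: rest).map Prod.fst).count k ≤ 2 := fun k =>
      le_trans (pvCount_cons_le _ _ _) (hc k)
    have hfr : ((k2,v2) :: rest).filter (fun p => p.1 == k1) = [] := by
      rw [List.filter_eq_nil_iff]
      intro p hp hpk
      exact hnot (by simpa [← (beq_iff_eq.1 hpk)] using List.mem_map_of_mem (f := Prod.fst) hp)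
    have hd : (((k1,v1) :: (k2,v2) :: rest).map Prod.fst).dedup
        = k1 :: (((k2,v2) :: rest).map Prod.fst).dedup := by
      simpa using List.dedup_cons_of_notMem hnot
    have hhead : pvContrib ((((k1,v1) :: (k2,v2) :: rest).filter
        (fun p => p.1 == k1)).map Prod.snd) = max v1 0 := by
      simp [hfr, pvContrib]
    have htail : ∀ k ∈ ((((k2,v2) :: rest).map Prod.fst)).dedup,
        pvContrib ((((k1,v1) :: (k2,v2) :: rest).filter (fun p => p.1 == k)).map Prod.snd)
          = pvContrib ((((k2,v2) :: rest).filter (fun p => p.1 == k)).map Prod.snd) := by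
      intro k hk
      have hk1ne : k1 ≠ k := fun h => hnot (h ▸ List.mem_dedup.1 hk)
      simp [List.filter_cons, hk1ne]
    rw [hd, List.map_cons, List.sum_cons, hhead, List.map_congr_left htail]
    have hL : pvScanB ((k1,v1) :: (k2,v2) :: rest) = max v1 0 + pvScanB ((k2,v2) :: rest) := by
      simp [pvScanB, hne]
    rw [hL, ih hs' hc']

theorem get_sum_set_eq_alt (set1 set2 : List (String × Int))
    (hn1 : (set1.map Prod.fst).Nodup) (hn2 : (set2.map Prod.fst).Nodup) :
    get_sum_set set1 set2 = get_sum_set_alt set1 set2 := by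
  rw [pvA_eq]
  show _ = pvScanB (PySem.List.sorted (set1 ++ set2) (fun p : String × Int => p.1) false)
  set f : String → Int :=
    fun k => max ((PySem.Dict.mk set1).getD k 0) ((PySem.Dict.mk set2).getD k 0) with hf
  set P := PySem.List.sorted (set1 ++ set2) (fun p : String × Int => p.1) false with hP
  have hperm : P.Perm (set1 ++ set2) := PySem.List.sorted_perm _ _ _
  have hs : P.Pairwise (fun a b : String × Int => a.1 ≤ b.1) := PySem.List.sorted_pairwise _ _
  have hc : ∀ k, (P.map Prod.fst).count k ≤ 2 := by
    intro k
    rw [(hperm.map Prod.fst).count_eq, List.map_append, List.count_append]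
    have h1 := List.nodup_iff_count_le_one.1 hn1 k
    have h2 := List.nodup_iff_count_le_one.1 hn2 k
    omega
  rw [pvScanB_eq P hs hc]
  have hU : ((P.map Prod.fst).dedup).Perm
      (PySem.Set.ofList (set1.map Prod.fst ++ set2.map Prod.fst)) := by
    refine (List.perm_ext_iff_of_nodup (List.nodup_dedup _) (PySem.Set.nodup_ofList _)).2 ?_
    intro a
    rw [List.mem_dedup, (hperm.map Prod.fst).mem_iff, PySem.Set.mem_ofList, List.map_append]
  have hcon : ∀ k ∈ (P.map Prod.fst).dedup,
      pvContrib ((P.filter (fun p => p.1 == k)).map Prod.snd) = f k := by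
    intro k hk
    have hpf : (P.filter (fun p => p.1 == k)).Perm
        ((set1.filter (fun p => p.1 == k)) ++ (set2.filter (fun p => p.1 == k))) := by
      rw [← List.filter_append]
      exact hperm.filter _
    by_cases h1 : k ∈ set1.map Prod.fst <;> by_cases h2 : k ∈ set2.map Prod.fst
    · obtain ⟨pv, hp⟩ := pvMemVal h1
      obtain ⟨qv, hq⟩ := pvMemVal h2
      have hf1 : set1.filter (fun p => p.1 == k) = [(k, pv)] := pvFilter_key_of_nodup hn1 hp
      have hf2 : set2.filter (fun p => p.1 == k) = [(k, qv)] := pvFilter_key_of_nodup hn2 hq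
      have hg1 : (PySem.Dict.mk set1).getD k 0 = pv :=
        PySem.Dict.getD_of_mem_items _ hp hn1 0
      have hg2 : (PySem.Dict.mk set2).getD k 0 = qv :=
        PySem.Dict.getD_of_mem_items _ hq hn2 0
      rw [hf1, hf2] at hpf
      rcases pvPerm_pair hpf with he | he <;>
        simp [he, pvContrib, hf, hg1, hg2, max_comm]
    · obtain ⟨pv, hp⟩ := pvMemVal h1
      have hf1 : set1.filter (fun p => p.1 == k) = [(k, pv)] := pvFilter_key_of_nodup hn1 hp
      have hf2 : set2.filter (fun p => p.1 == k) = [] := by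
        rw [List.filter_eq_nil_iff]
        intro p hpm hpkq
        exact h2 (by simpa [← (beq_iff_eq.1 hpkq)] using List.mem_map_of_mem (f := Prod.fst) hpm)
      have hg1 : (PySem.Dict.mk set1).getD k 0 = pv :=
        PySem.Dict.getD_of_mem_items _ hp hn1 0
      have hg2 : (PySem.Dict.mk set2).getD k 0 = 0 := by
        refine PySem.Dict.getD_of_not_contains _ _ ?_
        rw [PySem.Dict.contains_eq_decide_mem_keys]
        simpa using h2
      rw [hf1, hf2, List.append_nil] at hpf
      rw [List.Perm.eq_singleton hpf]
      simp [pvContrib, hf, hg1, hg2]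
    · obtain ⟨qv, hq⟩ := pvMemVal h2
      have hf2 : set2.filter (fun p => p.1 == k) = [(k, qv)] := pvFilter_key_of_nodup hn2 hq
      have hf1 : set1.filter (fun p => p.1 == k) = [] := by
        rw [List.filter_eq_nil_iff]
        intro p hpm hpkq
        exact h1 (by simpa [← (beq_iff_eq.1 hpkq)] using List.mem_map_of_mem (f := Prod.fst) hpm)
      have hg2 : (PySem.Dict.mk set2).getD k 0 = qv :=
        PySem.Dict.getD_of_mem_items _ hq hn2 0
      have hg1 : (PySem.Dict.mk set1).getD k 0 = 0 := by
        refine PySem.Dict.getD_of_not_contains _ _ ?_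
        rw [PySem.Dict.contains_eq_decide_mem_keys]
        simpa using h1
      rw [hf1, hf2, List.nil_append] at hpf
      rw [List.Perm.eq_singleton hpf]
      simp [pvContrib, hf, hg1, hg2, max_comm]
    · exfalso
      have := List.mem_dedup.1 hk
      rw [(hperm.map Prod.fst).mem_iff, List.map_append, List.mem_append] at this
      rcases this with h | h
      · exact h1 h
      · exact h2 h
  rw [List.map_congr_left hcon]
  exact ((hU.map f).sum_eq).symm

-- ===== VERDICT (by name: the statement is the Claim_ definition above) =====
theorem get_sum_set_spec : Claim_equal_get_sum_set := by
  intro set1 set2 _ hpre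
  exact get_sum_set_eq_alt set1 set2 hpre.1 hpre.2
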